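-- pv_equiv track=rewrite | github.com/svtuck/rebel-poker | eval/slumbot.py | parse_action_sequence
-- ===== SOURCE A (Python) =====
-- from typing import Any, Callable, Dict, List, Optional, Tuple
--
-- def parse_action_sequence(action: str) -> List[Tuple[str, Optional[int]]]:
--     """Parse Slumbot action string into a list of (action_type, amount) tuples.
--
--     Examples:
--         "cb300c" -> [('c', None), ('b', 300), ('c', None)]
--         "kb200c/kk" -> [('k', None), ('b', 200), ('c', None), ('/', None), ('k', None), ('k', None)]
--     """
--     parsed = []
--     i = 0
--     while i < len(action):
--         ch = action[i]
--         if ch == 'b':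
--             j = i + 1
--             while j < len(action) and action[j].isdigit():
--                 j += 1
--             amount = int(action[i+1:j]) if j > i + 1 else 0
--             parsed.append(('b', amount))
--             i = j
--         elif ch in ('k', 'c', 'f', '/'):
--             parsed.append((ch, None))
--             i += 1
--         else:
--             i += 1
--     return parsed
-- ===== SOURCE B (Python) =====
-- def parse_action_sequence(action):
--     """Single reverse pass: digit runs are accumulated into a value with a
--     running place-value multiplier and emitted when the bet marker that precedes it is seen."""
--     out = []
--     num, mult = 0, 1
--     for ch in reversed(action):
--         if ch.isdigit():
--             num += (ord(ch) - 48) * mult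
--             mult *= 10
--         else:
--             if ch == 'b':
--                 out.append(('b', num))
--             elif ch in 'kcf/':
--                 out.append((ch, None))
--             num, mult = 0, 1
--     out.reverse()
--     return out
-- ===== Notes on version B (the rewrite author's own statement) =====
-- stated objective: alternative
-- what changed: Replaces the index-driven while loop with a nested digit-scan and int() slicing by a single reverse pass that accumulates each digit run into its value with a running place-value multiplier, emitting it when the bet marker that precedes it is reached, then reverses the output.
import Mathlib
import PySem

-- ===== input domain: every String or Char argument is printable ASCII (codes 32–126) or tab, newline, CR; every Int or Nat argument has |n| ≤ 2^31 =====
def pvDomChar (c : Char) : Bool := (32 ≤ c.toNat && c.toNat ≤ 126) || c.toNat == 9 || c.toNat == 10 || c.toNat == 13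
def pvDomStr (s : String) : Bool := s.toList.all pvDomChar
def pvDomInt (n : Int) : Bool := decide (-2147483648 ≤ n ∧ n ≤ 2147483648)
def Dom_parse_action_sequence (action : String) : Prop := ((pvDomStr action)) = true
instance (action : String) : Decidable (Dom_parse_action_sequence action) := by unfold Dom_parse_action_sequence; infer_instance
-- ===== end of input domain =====

-- B replaces A's index loop with nested digit scan by a single reverse pass with a
-- place-value accumulator (objective: alternative; same O(n) cost).

-- ===== PORT A =====
-- int(s) hand-ported for the strings that reach it in A: exact on ASCII digit runs
-- (which is all A ever passes: action[i+1:j] consists of chars with .isdigit()).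
def pvIntOfDigits (ds : List Char) : Int :=
  ds.foldl (fun n d => n * 10 + ((d.toNat : Int) - 48)) 0

-- A's while-loop over the index i, with the inner digit scan as takeWhile/dropWhile.
-- Python's ch.isdigit() is Char.isDigit on the printable-ASCII domain.
def pvParseA : List Char → List (String × Option Int)
  | [] => []
  | ch :: rest =>
    if ch = 'b' then
      let ds := rest.takeWhile Char.isDigit
      let amount : Int := if ds ≠ [] then pvIntOfDigits ds else 0
      ("b", some amount) :: pvParseA (rest.dropWhile Char.isDigit)
    else if ch = 'k' ∨ ch = 'c' ∨ ch = 'f' ∨ ch = '/' then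
      (String.ofList [ch], none) :: pvParseA rest
    else
      pvParseA rest
termination_by l => l.length
decreasing_by
  · exact Nat.lt_succ_of_le (List.length_dropWhile_le _ _)
  · simp
  · simp

def parse_action_sequence (action : String) : List (String × Option Int) :=
  pvParseA action.toList

-- ===== PORT B =====
-- B's loop body: state is (out, num, mult); ord(ch) - 48 is (ch.toNat : Int) - 48.
def pvBStep (st : List (String × Option Int) × Int × Int) (ch : Char) :
    List (String × Option Int) × Int × Int :=
  if ch.isDigit then
    (st.1, st.2.1 + ((ch.toNat : Int) - 48) * st.2.2, st.2.2 * 10)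
  else
    let out :=
      if ch = 'b' then st.1 ++ [("b", some st.2.1)]
      else if ch = 'k' ∨ ch = 'c' ∨ ch = 'f' ∨ ch = '/' then st.1 ++ [(String.ofList [ch], none)]
      else st.1
    (out, 0, 1)

def parse_action_sequence_alt (action : String) : List (String × Option Int) :=
  ((action.toList.reverse.foldl pvBStep ([], 0, 1)).1).reverse

-- ===== PRECONDITION & SPEC =====
def Spec_parse_action_sequence (action : String) (out : List (String × Option Int)) : Prop := out = parse_action_sequence_alt action
instance (action : String) (out : List (String × Option Int)) : Decidable (Spec_parse_action_sequence action out) := by unfold Spec_parse_action_sequence; infer_instance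

-- ===== CLAIM (what is proved, stated in full; the proofs are below) =====
def Claim_equal_parse_action_sequence : Prop := ∀ (action : String), Dom_parse_action_sequence action → Spec_parse_action_sequence action (parse_action_sequence action)

-- ===== LEMMAS AND PROOFS =====

-- A skips digits it meets outside a 'b' run.
theorem pvParseA_dropWhile (l : List Char) :
    pvParseA (l.dropWhile Char.isDigit) = pvParseA l := by
  induction l with
  | nil => rfl
  | cons c l ih =>
    by_cases hc : Char.isDigit c
    · have hb : ¬ c = 'b' := by rintro rfl; simp [Char.isDigit] at hc
      have hk : ¬ (c = 'k' ∨ c = 'c' ∨ c = 'f' ∨ c = '/') := by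
        rintro (rfl | rfl | rfl | rfl) <;> simp [Char.isDigit] at hc
      rw [List.dropWhile_cons_of_pos hc, ih]
      conv_rhs => rw [pvParseA]
      simp [hb, hk]
    · rw [List.dropWhile_cons_of_neg hc]

theorem pvFoldShift (ds : List Char) (a : Int) :
    ds.foldl (fun n d => n * 10 + ((d.toNat : Int) - 48)) a =
      a * 10 ^ ds.length +
        ds.foldl (fun n d => n * 10 + ((d.toNat : Int) - 48)) 0 := by
  induction ds generalizing a with
  | nil => simp
  | cons d ds ih =>
    rw [List.foldl_cons, List.foldl_cons, ih, ih (0 * 10 + ((d.toNat : Int) - 48)),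
      List.length_cons, pow_succ]
    ring

theorem pvIntOfDigits_cons (d : Char) (ds : List Char) :
    pvIntOfDigits (d :: ds) =
      pvIntOfDigits ds + ((d.toNat : Int) - 48) * 10 ^ ds.length := by
  unfold pvIntOfDigits
  rw [List.foldl_cons, pvFoldShift]
  ring

-- The loop invariant of B's reverse pass, read off the front of the string.
theorem pvB_inv (l : List Char) :
    l.reverse.foldl pvBStep ([], 0, 1) =
      ((pvParseA (l.dropWhile Char.isDigit)).reverse,
       pvIntOfDigits (l.takeWhile Char.isDigit),
       10 ^ (l.takeWhile Char.isDigit).length) := by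
  induction l with
  | nil => simp [pvIntOfDigits, pvParseA]
  | cons c l ih =>
    rw [List.reverse_cons, List.foldl_append, ih, List.foldl_cons, List.foldl_nil]
    by_cases hc : Char.isDigit c
    · rw [List.dropWhile_cons_of_pos hc, List.takeWhile_cons_of_pos hc,
        pvIntOfDigits_cons, List.length_cons, pow_succ]
      simp only [pvBStep, hc, if_pos]
    · rw [List.dropWhile_cons_of_neg hc, List.takeWhile_cons_of_neg hc]
      by_cases hb : c = 'b'
      · subst hb
        conv_rhs => rw [pvParseA]
        simp [pvBStep, hc, pvParseA_dropWhile, pvIntOfDigits]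
        intro h
        have ht : List.takeWhile Char.isDigit l = [] := by
          rcases l with _ | ⟨d, t⟩
          · rfl
          · rw [List.takeWhile_cons_of_neg]
            simpa using h (by simp)
        simp [ht]
      · by_cases hk : c = 'k' ∨ c = 'c' ∨ c = 'f' ∨ c = '/'
        · conv_rhs => rw [pvParseA]
          simp [pvBStep, hc, hb, hk, pvParseA_dropWhile, pvIntOfDigits]
        · conv_rhs => rw [pvParseA]
          simp [pvBStep, hc, hb, hk, pvParseA_dropWhile, pvIntOfDigits]

-- ===== VERDICT (by name: the statement is the Claim_ definition above) =====
theorem parse_action_sequence_spec : Claim_equal_parse_action_sequence := by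
  intro action _
  unfold Spec_parse_action_sequence parse_action_sequence parse_action_sequence_alt
  rw [pvB_inv, List.reverse_reverse, pvParseA_dropWhile]
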